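-- pv_equiv track=rewrite | github.com/horridharry96/huricannes | hurricanes.py | most_affected
-- ===== SOURCE A (Python) =====
-- def most_affected(dict2):
--     num = []
--     max_area = {}
--     for i in dict2.keys():
--         num.append(dict2[i])
--     num1 = max(num)
--     for key, value in dict2.items():
--         if value == num1:
--             max_area.update({key:value})
--     return max_area
-- ===== SOURCE B (Python) =====
-- def most_affected(dict2):
--     best = None
--     result = {}
--     for key, value in dict2.items():
--         if best is None or value > best:
--             best = value
--             result = {key: value}
--         elif value == best:
--             result[key] = value
--     return result
-- ===== Notes on version B (the rewrite author's own statement) =====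
-- stated objective: simpler
-- what changed: Replaced A's two passes (collect all values via key lookups, take max, then re-scan items filtering for the max) by a single pass over the items that maintains a running best value and resets/extends the result dict as it goes.
-- outside the precondition, e.g. on most_affected({}): A raises ValueError, B returns {}
import Mathlib
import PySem

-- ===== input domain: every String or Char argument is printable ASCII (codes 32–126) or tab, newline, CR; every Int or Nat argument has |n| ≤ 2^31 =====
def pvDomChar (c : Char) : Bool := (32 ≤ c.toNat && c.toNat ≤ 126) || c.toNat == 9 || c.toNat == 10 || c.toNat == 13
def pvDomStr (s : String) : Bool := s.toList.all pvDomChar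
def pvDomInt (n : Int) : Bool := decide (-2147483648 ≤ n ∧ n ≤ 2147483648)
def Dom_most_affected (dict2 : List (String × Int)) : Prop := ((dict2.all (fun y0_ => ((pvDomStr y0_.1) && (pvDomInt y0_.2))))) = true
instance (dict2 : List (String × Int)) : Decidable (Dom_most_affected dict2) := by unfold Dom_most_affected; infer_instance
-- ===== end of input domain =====

-- B replaces A's two passes (collect values, max, filter) by one pass keeping a running best and result; simpler, same return value (A raises on the empty dict, excluded by Pre_).


-- ===== PORT A =====
def most_affected (dict2 : List (String × Int)) : List (String × Int) :=
  let d := PySem.Dict.mk dict2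
  -- num = []; for i in dict2.keys(): num.append(dict2[i])   (key i is always present, so the getD default is never used)
  let num := d.keys.foldl (fun acc i => acc ++ [d.getD i 0]) []
  match PySem.List.max? num (fun x => x) with
  | none => []          -- max([]) raises ValueError; excluded by Pre_most_affected
  | some num1 =>
      -- max_area = {}; for key, value in dict2.items(): if value == num1: max_area.update({key: value})
      (d.items.foldl (fun ma kv => if kv.2 = num1 then ma.insert kv.1 kv.2 else ma)
        PySem.Dict.empty).items

-- ===== PORT B =====
-- the body of B's single loop: state = (best, result)
def bStep (st : Option Int × PySem.Dict String Int) (kv : String × Int) :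
    Option Int × PySem.Dict String Int :=
  match st.1 with
  | none => (some kv.2, PySem.Dict.mk [(kv.1, kv.2)])        -- best = value; result = {key: value}
  | some b =>
      if kv.2 > b then (some kv.2, PySem.Dict.mk [(kv.1, kv.2)])
      else if kv.2 = b then (st.1, st.2.insert kv.1 kv.2)    -- result[key] = value
      else st

def most_affected_alt (dict2 : List (String × Int)) : List (String × Int) :=
  -- best = None; result = {}; one pass over the items
  (dict2.foldl bStep ((none : Option Int), PySem.Dict.empty)).2.items

-- ===== PRECONDITION & SPEC =====
-- Pre_ excludes the empty dict (A's max([]) raises ValueError) and requires distinct keys,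
-- since the Python argument is a dict and can never present duplicate keys.
def Pre_most_affected (dict2 : List (String × Int)) : Prop :=
  dict2 ≠ [] ∧ (dict2.map Prod.fst).Nodup
instance (dict2 : List (String × Int)) : Decidable (Pre_most_affected dict2) := by
  unfold Pre_most_affected; infer_instance
def pvWitness_most_affected : (List (String × Int)) := [("florida", 4), ("cuba", 7), ("texas", 7)]

def Spec_most_affected (dict2 : List (String × Int)) (out : List (String × Int)) : Prop := out = most_affected_alt dict2
instance (dict2 : List (String × Int)) (out : List (String × Int)) : Decidable (Spec_most_affected dict2 out) := by unfold Spec_most_affected; infer_instance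

-- ===== CLAIM (what is proved, stated in full; the proofs are below) =====
def Claim_equal_most_affected : Prop := ∀ (dict2 : List (String × Int)), Dom_most_affected dict2 → Pre_most_affected dict2 → Spec_most_affected dict2 (most_affected dict2)

-- ===== LEMMAS AND PROOFS =====

-- running max of the values of a list of pairs, seeded with m
def pvVMax (xs : List (String × Int)) (m : Int) : Int :=
  xs.foldl (fun a kv => max a kv.2) m

lemma pvVMax_cons (x : String × Int) (xs : List (String × Int)) (m : Int) :
    pvVMax (x :: xs) m = pvVMax xs (max m x.2) := rfl

lemma le_pvVMax (xs : List (String × Int)) (m : Int) : m ≤ pvVMax xs m :=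
  (PySem.List.le_foldl_max_int xs (fun kv => kv.2) m).1

lemma bStep_none (kv : String × Int) (r : PySem.Dict String Int) :
    bStep (none, r) kv = (some kv.2, PySem.Dict.mk [(kv.1, kv.2)]) := rfl

lemma bStep_gt (kv : String × Int) (m : Int) (r : PySem.Dict String Int) (h : kv.2 > m) :
    bStep (some m, r) kv = (some kv.2, PySem.Dict.mk [(kv.1, kv.2)]) := by
  simp [bStep, h]

lemma bStep_eq (kv : String × Int) (m : Int) (r : PySem.Dict String Int) (h : kv.2 = m) :
    bStep (some m, r) kv = (some m, r.insert kv.1 kv.2) := by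
  simp [bStep, h]

lemma bStep_lt (kv : String × Int) (m : Int) (r : PySem.Dict String Int) (h : kv.2 < m) :
    bStep (some m, r) kv = (some m, r) := by
  have h1 : ¬ kv.2 > m := by omega
  have h2 : ¬ kv.2 = m := by omega
  simp [bStep, h1, h2]

-- appending loop = map
lemma foldl_append_singleton {α β : Type} (f : α → β) :
    ∀ (l : List α) (a : List β), l.foldl (fun acc i => acc ++ [f i]) a = a ++ l.map f := by
  intro l
  induction l with
  | nil => simp
  | cons x t ih => intro a; simp [List.foldl, ih]

-- A's fold-with-if = fold over filter
lemma foldl_if_eq_foldl_filter (num1 : Int) :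
    ∀ (l : List (String × Int)) (a : PySem.Dict String Int),
      l.foldl (fun ma kv => if kv.2 = num1 then ma.insert kv.1 kv.2 else ma) a
        = (l.filter (fun kv => decide (kv.2 = num1))).foldl (fun ma kv => ma.insert kv.1 kv.2) a := by
  intro l
  induction l with
  | nil => simp
  | cons x t ih =>
      intro a
      by_cases h : x.2 = num1 <;> simp [List.foldl, List.filter_cons, h, ih]

-- A's first loop under Nodup keys collects exactly the values, in order
lemma num_eq_values (dict2 : List (String × Int)) (hnd : (dict2.map Prod.fst).Nodup) :
    (PySem.Dict.mk dict2).keys.foldl (fun acc i => acc ++ [(PySem.Dict.mk dict2).getD i 0]) []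
      = dict2.map Prod.snd := by
  rw [foldl_append_singleton]
  have hnd' : (PySem.Dict.mk dict2).keys.Nodup := by
    simpa [PySem.Dict.keys] using hnd
  have h := PySem.Dict.values_eq_map_keys (PySem.Dict.mk dict2) hnd' 0
  simpa [PySem.Dict.values, PySem.Dict.keys, PySem.Dict.items] using h.symm

-- B's loop invariant: from state (some m, r), with keys of xs fresh in r and distinct,
-- the fold computes the running max M and keeps r's items iff m is still M, then the M-filtered suffix.
lemma B_invariant :
    ∀ (xs : List (String × Int)) (m : Int) (r : PySem.Dict String Int),
      (∀ kv ∈ xs, r.contains kv.1 = false) → (xs.map Prod.fst).Nodup →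
      xs.foldl bStep (some m, r)
        = (some (pvVMax xs m),
           PySem.Dict.mk ((if m = pvVMax xs m then r.items else [])
             ++ xs.filter (fun kv => decide (kv.2 = pvVMax xs m)))) := by
  intro xs
  induction xs with
  | nil => intro m r _ _; simp [pvVMax]
  | cons x t ih =>
      intro m r hfresh hnd
      obtain ⟨k, v⟩ := x
      have h2 : (k :: t.map Prod.fst).Nodup := by simpa using hnd
      have hknot : k ∉ t.map Prod.fst := (List.nodup_cons.mp h2).1
      have hnd' : (t.map Prod.fst).Nodup := (List.nodup_cons.mp h2).2
      have hfresh1 : ∀ kv ∈ t, (PySem.Dict.mk [(k, v)]).contains kv.1 = false := by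
        intro kv hkv
        have hne : kv.1 ≠ k := by
          intro he; exact hknot (by simpa [he] using List.mem_map_of_mem (f := Prod.fst) hkv)
        simp [PySem.Dict.contains, PySem.Dict.keys, PySem.Dict.items]
        exact fun h => absurd h.symm hne
      rw [List.foldl_cons]
      rcases lt_trichotomy m v with hgt | heq | hlt
      · rw [bStep_gt (k, v) m r hgt, ih v (PySem.Dict.mk [(k, v)]) hfresh1 hnd']
        have hM : pvVMax ((k, v) :: t) m = pvVMax t v := by
          simp [pvVMax_cons, max_eq_right (le_of_lt hgt)]
        have hmne : m ≠ pvVMax t v := by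
          have : v ≤ pvVMax t v := le_pvVMax t v
          omega
        rw [hM]
        by_cases hvM : v = pvVMax t v
        · simp [hmne, List.filter_cons, ← hvM, PySem.Dict.items]
          intro h; exact absurd h (by omega)
        · simp [hvM, hmne, List.filter_cons, PySem.Dict.items]
      · have heq' : (k, v).2 = m := heq.symm
        rw [bStep_eq (k, v) m r heq']
        have hkr : r.contains k = false := hfresh (k, v) List.mem_cons_self
        rw [ih m (r.insert k v)
          (by
            intro kv hkv
            have hne : kv.1 ≠ k := by
              intro he; exact hknot (by simpa [he] using List.mem_map_of_mem (f := Prod.fst) hkv)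
            rw [PySem.Dict.contains_insert]
            simp [hne, hfresh kv (List.mem_cons_of_mem _ hkv)]) hnd']
        have hM : pvVMax ((k, v) :: t) m = pvVMax t m := by
          simp [pvVMax_cons, ← heq]
        rw [hM]
        have hins := PySem.Dict.items_insert_of_not_contains (d := r) (k := k) (v := v) hkr
        by_cases hmM : m = pvVMax t m
        · simp [hins, List.filter_cons, heq', ← hmM]
          omega
        · have hvne : v ≠ pvVMax t m := by intro h; exact hmM (by omega)
          simp [hmM, hvne, List.filter_cons]
      · rw [bStep_lt (k, v) m r hlt, ih m r (fun kv hkv => hfresh kv (List.mem_cons_of_mem _ hkv)) hnd']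
        have hM : pvVMax ((k, v) :: t) m = pvVMax t m := by
          simp [pvVMax_cons, max_eq_left (le_of_lt hlt)]
        have hvne : v ≠ pvVMax t m := by
          have := le_pvVMax t m; omega
        rw [hM]
        simp [List.filter_cons, hvne]

-- ===== VERDICT (by name: the statement is the Claim_ definition above) =====
theorem most_affected_spec : Claim_equal_most_affected := by
  intro dict2 _ hpre
  obtain ⟨hne, hnd⟩ := hpre
  unfold Spec_most_affected
  simp only [most_affected, most_affected_alt]
  obtain ⟨⟨k, v⟩, t, rfl⟩ : ∃ x t, dict2 = x :: t := by
    cases dict2 with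
    | nil => exact absurd rfl hne
    | cons x t => exact ⟨x, t, rfl⟩
  rw [num_eq_values _ hnd]
  have h2 : (k :: t.map Prod.fst).Nodup := by simpa using hnd
  have hknot : k ∉ t.map Prod.fst := (List.nodup_cons.mp h2).1
  have hnd' : (t.map Prod.fst).Nodup := (List.nodup_cons.mp h2).2
  -- the max of the values, via max?_id_cons and foldl_map
  have hmax : PySem.List.max? (((k, v) :: t).map Prod.snd) (fun x => x)
      = some (pvVMax t v) := by
    rw [List.map_cons, PySem.List.max?_id_cons]
    unfold pvVMax
    rw [List.foldl_map]
  rw [hmax]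
  show (List.foldl (fun ma kv => if kv.2 = pvVMax t v then ma.insert kv.1 kv.2 else ma)
      PySem.Dict.empty ((k, v) :: t)).items
    = (List.foldl bStep ((none : Option Int), PySem.Dict.empty) ((k, v) :: t)).2.items
  -- B: first step then the invariant
  conv_rhs => rw [List.foldl_cons]
  rw [bStep_none (k, v) PySem.Dict.empty, B_invariant t v (PySem.Dict.mk [(k, v)])
    (by
      intro kv hkv
      have hne' : kv.1 ≠ k := by
        intro he; exact hknot (by simpa [he] using List.mem_map_of_mem (f := Prod.fst) hkv)
      simp [PySem.Dict.contains, PySem.Dict.keys, PySem.Dict.items]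
      exact fun h => absurd h.symm hne') hnd']
  -- A: fold-with-if = fold over filter, then the fresh-distinct-key insert loop appends
  rw [foldl_if_eq_foldl_filter (pvVMax t v)]
  have hfilterNodup : ((((k, v) :: t).filter (fun kv => decide (kv.2 = pvVMax t v))).map Prod.fst).Nodup :=
    hnd.sublist (List.Sublist.map Prod.fst List.filter_sublist)
  have happ := PySem.Dict.items_foldl_insert_fresh
    (l := ((k, v) :: t).filter (fun kv => decide (kv.2 = pvVMax t v)))
    (k := Prod.fst) (v := Prod.snd) (d := PySem.Dict.empty)
    (by intro a _; simp [PySem.Dict.contains_empty]) hfilterNodup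
  rw [show (fun (ma : PySem.Dict String Int) (kv : String × Int) => ma.insert kv.1 kv.2)
      = (fun (d : PySem.Dict String Int) (a : String × Int) => d.insert (Prod.fst a) (Prod.snd a)) from rfl]
  rw [happ]
  -- both sides are now the filtered list
  by_cases hvM : v = pvVMax t v
  · simp [List.filter_cons, ← hvM, PySem.Dict.items, PySem.Dict.empty]
  · simp [List.filter_cons, hvM, PySem.Dict.items, PySem.Dict.empty]
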